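-- pv_equiv track=rewrite | github.com/RaVincentHuang/thought-graph | mining/src/RL/OpenRLHF/openrlhf/cli/serve_rm_block_weight_new.py | extract_numbers
-- ===== SOURCE A (Python) =====
-- def extract_numbers(expr) -> list:
--     curr_num = ''
--     numbers = []
--     for c in expr:
--         if c.isdigit():
--             curr_num += c
--         elif curr_num:
--             numbers.append(int(curr_num))
--             curr_num = ''
--     if curr_num:
--         numbers.append(int(curr_num))
--     return numbers
-- ===== SOURCE B (Python) =====
-- def extract_numbers(expr) -> list:
--     # Two-pointer scan: find each maximal digit run and convert the slice at once,
--     # instead of accumulating characters one by one.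
--     numbers = []
--     i, n = 0, len(expr)
--     while i < n:
--         if expr[i].isdigit():
--             j = i
--             while j < n and expr[j].isdigit():
--                 j += 1
--             numbers.append(int(expr[i:j]))
--             i = j
--         else:
--             i += 1
--     return numbers
-- ===== Notes on version B (the rewrite author's own statement) =====
-- stated objective: alternative
-- what changed: Replaced the per-character accumulator state machine (curr_num string built up char by char, with a tail-flush branch) by a two-pointer scan that locates each maximal digit run and converts the slice expr[i:j] in one step, with no pending-state flush.
import Mathlib
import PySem

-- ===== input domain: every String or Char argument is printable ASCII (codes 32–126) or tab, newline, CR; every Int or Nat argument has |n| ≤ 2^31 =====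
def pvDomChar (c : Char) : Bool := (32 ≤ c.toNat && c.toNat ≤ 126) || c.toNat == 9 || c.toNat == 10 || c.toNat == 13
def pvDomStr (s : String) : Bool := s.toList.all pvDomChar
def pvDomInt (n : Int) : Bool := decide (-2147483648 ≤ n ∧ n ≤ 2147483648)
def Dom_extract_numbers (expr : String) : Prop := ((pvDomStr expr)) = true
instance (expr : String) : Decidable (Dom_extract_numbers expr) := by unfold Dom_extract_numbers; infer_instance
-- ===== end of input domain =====

-- B is an alternative exact re-implementation: a two-pointer maximal-run scan instead of
-- A's per-character accumulator state machine; return values proved equal on all inputs.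

-- int(cs) for a string of chars; in both programs it is only applied to nonempty digit runs,
-- where Python's int() always returns (the getD 0 default is never reached).
def pvIntOf (cs : List Char) : Int := (PySem.Int.ofChars? cs).getD 0

-- ===== PORT A =====
-- for c in expr: the loop's state is (curr_num, numbers), carried through a structural recursion
def extA_loop (curr : List Char) (numbers : List Int) : List Char → List Char × List Int
  | [] => (curr, numbers)
  | c :: rest =>
    if PySem.Str.isdigit c then extA_loop (curr ++ [c]) numbers rest
    else if curr ≠ [] then extA_loop [] (numbers ++ [pvIntOf curr]) rest
    else extA_loop curr numbers rest

def extract_numbers (expr : String) : List Int :=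
  let st := extA_loop [] [] expr.toList
  if st.1 ≠ [] then st.2 ++ [pvIntOf st.1] else st.2

-- ===== PORT B =====
-- inner while: advance j while j < n and expr[j].isdigit()
def extB_scan (s : List Char) (j : Nat) : Nat :=
  if j < s.length ∧ PySem.Str.isdigit (s.getD j ' ') then extB_scan s (j + 1) else j
termination_by s.length - j
decreasing_by omega

theorem extB_scan_ge (s : List Char) (j : Nat) : j ≤ extB_scan s j := by
  fun_induction extB_scan s j with
  | case1 j h ih => omega
  | case2 j h => omega

theorem extB_scan_gt (s : List Char) (i : Nat) (hi : i < s.length)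
    (hd : PySem.Str.isdigit (s.getD i ' ') = true) : i < extB_scan s i := by
  rw [extB_scan]
  simp only [hi, hd, and_self, if_pos]
  exact Nat.lt_of_lt_of_le (Nat.lt_succ_self i) (extB_scan_ge s (i + 1))

-- outer while over index i; expr[i:j] is PySem.List.slice
def extB_loop (s : List Char) (i : Nat) (numbers : List Int) : List Int :=
  if hi : i < s.length then
    if hd : PySem.Str.isdigit (s.getD i ' ') then
      let j := extB_scan s i
      extB_loop s j (numbers ++ [pvIntOf (PySem.List.slice s (some (i : Int)) (some (j : Int)))])
    else extB_loop s (i + 1) numbers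
  else numbers
termination_by s.length - i
decreasing_by
  · have := extB_scan_gt s i hi hd; omega
  · omega

def extract_numbers_alt (expr : String) : List Int :=
  extB_loop expr.toList 0 []

-- ===== PRECONDITION & SPEC =====
def Spec_extract_numbers (expr : String) (out : List Int) : Prop := out = extract_numbers_alt expr
instance (expr : String) (out : List Int) : Decidable (Spec_extract_numbers expr out) := by unfold Spec_extract_numbers; infer_instance

-- ===== CLAIM (what is proved, stated in full; the proofs are below) =====
def Claim_equal_extract_numbers : Prop := ∀ (expr : String), Dom_extract_numbers expr → Spec_extract_numbers expr (extract_numbers expr)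

-- ===== LEMMAS AND PROOFS =====

-- canonical "maximal digit runs" recursion both ports are reduced to
def specB : List Char → List Int
  | [] => []
  | c :: cs =>
    if PySem.Str.isdigit c then
      pvIntOf (c :: cs.takeWhile PySem.Str.isdigit) :: specB (cs.dropWhile PySem.Str.isdigit)
    else specB cs
termination_by l => l.length
decreasing_by
  · have := List.length_dropWhile_le (p := PySem.Str.isdigit) (l := cs); simp; omega
  · simp

theorem take_length_takeWhile (p : Char → Bool) (l : List Char) :
    l.take (l.takeWhile p).length = l.takeWhile p := by
  induction l with
  | nil => simp
  | cons c cs ih =>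
    by_cases h : p c <;> simp [h, ih]

theorem drop_length_takeWhile (p : Char → Bool) (l : List Char) :
    l.drop (l.takeWhile p).length = l.dropWhile p := by
  induction l with
  | nil => simp
  | cons c cs ih =>
    by_cases h : p c <;> simp [h, ih]

theorem extB_scan_spec (s : List Char) (i : Nat) :
    extB_scan s i = i + ((s.drop i).takeWhile PySem.Str.isdigit).length := by
  fun_induction extB_scan s i with
  | case1 j h ih =>
    obtain ⟨hj, hd⟩ := h
    rw [List.drop_eq_getElem_cons hj, List.takeWhile_cons]
    rw [List.getD_eq_getElem s ' ' hj] at hd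
    rw [if_pos hd]
    simp only [List.length_cons]
    omega
  | case2 j h =>
    by_cases hj : j < s.length
    · have hd : PySem.Str.isdigit (s.getD j ' ') = false := by
        cases hh : PySem.Str.isdigit (s.getD j ' ') with
        | true => exact absurd ⟨hj, hh⟩ h
        | false => rfl
      rw [List.drop_eq_getElem_cons hj, List.takeWhile_cons]
      rw [List.getD_eq_getElem s ' ' hj] at hd
      simp [hd]
    · rw [List.drop_eq_nil_of_le (by omega)]; simp

theorem extB_loop_spec (s : List Char) (i : Nat) (numbers : List Int) :
    extB_loop s i numbers = numbers ++ specB (s.drop i) := by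
  fun_induction extB_loop s i numbers with
  | case1 i numbers hi hd j ih =>
    have hdrop : s.drop i = s.getD i ' ' :: s.drop (i + 1) := by
      rw [List.getD_eq_getElem s ' ' hi]; exact List.drop_eq_getElem_cons hi
    have hscan := extB_scan_spec s i
    have hj : j = i + ((s.drop i).takeWhile PySem.Str.isdigit).length := hscan
    rw [ih, hdrop, specB, if_pos hd, List.append_assoc]
    congr 1
    have htw : (s.drop i).takeWhile PySem.Str.isdigit
        = s.getD i ' ' :: (s.drop (i + 1)).takeWhile PySem.Str.isdigit := by
      rw [hdrop, List.takeWhile_cons, if_pos hd]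
    have hdw : (s.drop i).dropWhile PySem.Str.isdigit
        = (s.drop (i + 1)).dropWhile PySem.Str.isdigit := by
      rw [hdrop, List.dropWhile_cons_of_pos hd]
    have hslice : PySem.List.slice s (some (i : Int)) (some (j : Int))
        = (s.drop i).takeWhile PySem.Str.isdigit := by
      rw [PySem.List.slice_natCast, hj]
      have : i + ((s.drop i).takeWhile PySem.Str.isdigit).length - i
          = ((s.drop i).takeWhile PySem.Str.isdigit).length := by omega
      rw [this, take_length_takeWhile]
    have hrest : s.drop j = (s.drop i).dropWhile PySem.Str.isdigit := by
      rw [hj, ← List.drop_drop, drop_length_takeWhile]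
    rw [hslice, hrest, hdw, htw]
    simp
  | case2 i numbers hi hd ih =>
    have hdrop : s.drop i = s.getD i ' ' :: s.drop (i + 1) := by
      rw [List.getD_eq_getElem s ' ' hi]; exact List.drop_eq_getElem_cons hi
    rw [ih, hdrop, specB, if_neg hd]
  | case3 i numbers hi =>
    rw [List.drop_eq_nil_of_le (by omega)]; simp [specB]

-- finishing step of A (the post-loop flush)
def finishA (st : List Char × List Int) : List Int :=
  if st.1 ≠ [] then st.2 ++ [pvIntOf st.1] else st.2

theorem extA_loop_spec (l : List Char) (curr : List Char) (numbers : List Int) :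
    finishA (extA_loop curr numbers l)
      = numbers ++ (if curr = [] then specB l
          else pvIntOf (curr ++ l.takeWhile PySem.Str.isdigit)
                :: specB (l.dropWhile PySem.Str.isdigit)) := by
  induction l generalizing curr numbers with
  | nil =>
    by_cases hc : curr = [] <;>
      simp [extA_loop, finishA, hc, specB]
  | cons c cs ih =>
    by_cases hd : PySem.Str.isdigit c
    · rw [extA_loop, if_pos hd, ih]
      have hne : curr ++ [c] ≠ [] := by simp
      rw [if_neg hne]
      by_cases hc : curr = []
      · subst hc
        rw [if_pos rfl, specB, if_pos hd]
        simp
      · rw [if_neg hc]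
        simp [hd, List.dropWhile_cons_of_pos hd]
    · rw [extA_loop, if_neg hd]
      by_cases hc : curr = []
      · subst hc
        rw [if_neg (by simp), ih, if_pos rfl, if_pos rfl, specB, if_neg (by simp [hd])]
      · rw [if_pos hc, ih, if_pos rfl, if_neg hc]
        rw [List.takeWhile_cons, if_neg (by simp [hd]), List.dropWhile_cons_of_neg (by simp [hd])]
        rw [specB, if_neg (by simp [hd])]
        simp

-- ===== VERDICT (by name: the statement is the Claim_ definition above) =====
theorem extract_numbers_spec : Claim_equal_extract_numbers := by
  intro expr _
  unfold Spec_extract_numbers extract_numbers_alt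
  have hA := extA_loop_spec expr.toList [] []
  have hB := extB_loop_spec expr.toList 0 []
  simp only [List.drop_zero, List.nil_append] at hB
  simp only [List.nil_append] at hA
  have hA' : extract_numbers expr = finishA (extA_loop [] [] expr.toList) := rfl
  rw [hB, hA', hA]
  simp
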